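-- pv_equiv track=rewrite | github.com/tadviv/python-myproject | love_test.py | calculate_name_match
-- ===== SOURCE A (Python) =====
-- def calculate_name_match(name1, name2):
--     """
--     Calculates the number of common letters between two names (case-insensitive).
--     """
--     name1_lower = name1.lower()
--     name2_lower = name2.lower()
--
--     freq1 = {}
--     for char in name1_lower:
--         if 'a' <= char <= 'z':
--             freq1[char] = freq1.get(char, 0) + 1
--
--     freq2 = {}
--     for char in name2_lower:
--         if 'a' <= char <= 'z':
--             freq2[char] = freq2.get(char, 0) + 1
--
--     matched_letters_count = 0
--     for char, count1 in freq1.items():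
--         if char in freq2:
--             matched_letters_count += min(count1, freq2[char])
--
--     return matched_letters_count
-- ===== SOURCE B (Python) =====
-- def calculate_name_match(name1, name2):
--     """Counts common letters (case-insensitive) by sorting the letters of both names
--     and walking the two sorted sequences with a two-pointer merge, counting matches."""
--     a = sorted(c for c in name1.lower() if 'a' <= c <= 'z')
--     b = sorted(c for c in name2.lower() if 'a' <= c <= 'z')
--     i = j = total = 0
--     while i < len(a) and j < len(b):
--         if a[i] == b[j]:
--             total += 1
--             i += 1
--             j += 1
--         elif a[i] < b[j]:
--             i += 1
--         else:
--             j += 1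
--     return total
-- ===== Notes on version B (the rewrite author's own statement) =====
-- stated objective: alternative
-- what changed: B builds no frequency tables at all: it sorts the letters of each lowercased name and counts common letters with a two-pointer merge over the two sorted sequences, instead of A's dict-building passes followed by an items/intersection pass.
import Mathlib
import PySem

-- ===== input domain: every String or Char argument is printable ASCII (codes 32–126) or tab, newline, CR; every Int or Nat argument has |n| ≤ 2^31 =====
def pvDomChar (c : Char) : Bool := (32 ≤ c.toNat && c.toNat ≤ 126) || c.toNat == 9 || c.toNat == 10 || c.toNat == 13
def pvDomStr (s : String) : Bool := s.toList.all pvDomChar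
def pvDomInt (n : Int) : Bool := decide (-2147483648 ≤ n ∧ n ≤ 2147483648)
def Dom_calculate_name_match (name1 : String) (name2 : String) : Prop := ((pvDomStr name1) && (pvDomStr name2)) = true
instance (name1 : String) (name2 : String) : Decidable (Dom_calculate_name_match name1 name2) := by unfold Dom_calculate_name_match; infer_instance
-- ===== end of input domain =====

-- B replaces A's frequency-dictionary build + intersection pass by sorting the letters of
-- both names and counting common letters with a two-pointer merge (alternative algorithm).


-- ===== PORT A =====
-- 'a' <= char <= 'z'
def pvIsLetter (c : Char) : Bool := decide ('a' ≤ c) && decide (c ≤ 'z')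

def calculate_name_match (name1 : String) (name2 : String) : Int :=
  let name1_lower := PySem.Str.lower name1
  let name2_lower := PySem.Str.lower name2
  let freq1 := name1_lower.toList.foldl
    (fun d char => if pvIsLetter char then d.insert char (d.getD char 0 + 1) else d)
    (PySem.Dict.empty : PySem.Dict Char Int)
  let freq2 := name2_lower.toList.foldl
    (fun d char => if pvIsLetter char then d.insert char (d.getD char 0 + 1) else d)
    (PySem.Dict.empty : PySem.Dict Char Int)
  freq1.items.foldl
    (fun matched_letters_count p =>
      if freq2.contains p.1 then matched_letters_count + min p.2 (freq2.getD p.1 0)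
      else matched_letters_count)
    0

-- ===== PORT B =====
-- the while loop of Source B: two pointers into the sorted lists, kept as the suffixes not yet consumed
def pvMergeCount (a : List Char) (b : List Char) (total : Int) : Int :=
  match a, b with
  | x :: as_, y :: bs => 
    if x = y then pvMergeCount as_ bs (total + 1)
    else if x < y then pvMergeCount as_ (y :: bs) total
    else pvMergeCount (x :: as_) bs total
  | _, _ => total

def calculate_name_match_alt (name1 : String) (name2 : String) : Int :=
  let a := PySem.List.sorted (((PySem.Str.lower name1).toList).filter pvIsLetter) (fun c => c) false
  let b := PySem.List.sorted (((PySem.Str.lower name2).toList).filter pvIsLetter) (fun c => c) false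
  pvMergeCount a b 0

-- ===== PRECONDITION & SPEC =====
def Spec_calculate_name_match (name1 : String) (name2 : String) (out : Int) : Prop := out = calculate_name_match_alt name1 name2
instance (name1 : String) (name2 : String) (out : Int) : Decidable (Spec_calculate_name_match name1 name2 out) := by unfold Spec_calculate_name_match; infer_instance

-- ===== CLAIM (what is proved, stated in full; the proofs are below) =====
def Claim_equal_calculate_name_match : Prop := ∀ (name1 : String) (name2 : String), Dom_calculate_name_match name1 name2 → Spec_calculate_name_match name1 name2 (calculate_name_match name1 name2)

-- ===== LEMMAS AND PROOFS =====

-- a char in the letter range is in the literal alphabet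
lemma mem_alpha {c : Char} (h : pvIsLetter c = true) :
    c ∈ "abcdefghijklmnopqrstuvwxyz".toList := by
  simp only [pvIsLetter, Bool.and_eq_true, decide_eq_true_eq] at h
  have h1 : 97 ≤ c.toNat := by exact_mod_cast h.1
  have h2 : c.toNat ≤ 122 := by exact_mod_cast h.2
  obtain ⟨n, hn⟩ : ∃ n, c.toNat = n := ⟨_, rfl⟩
  rw [← Char.ofNat_toNat c, hn]
  rw [hn] at h1 h2
  interval_cases n <;> decide

lemma alpha_nodup : ("abcdefghijklmnopqrstuvwxyz".toList).Nodup := by decide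

-- the value both programs compute: the alphabet sum of per-letter min-counts
def pvS (a b : List Char) : Int :=
  (("abcdefghijklmnopqrstuvwxyz".toList).map
    (fun c => min ((a.count c : Int)) ((b.count c : Int)))).sum

lemma pvS_nil_left (b : List Char) : pvS [] b = 0 := by
  simp [pvS]

lemma pvS_nil_right (a : List Char) : pvS a [] = 0 := by
  unfold pvS
  rw [show ((fun c => min ((a.count c : Int)) ((([] : List Char).count c : Int)))) = fun c => 0 by
    funext c
    simp]
  simp

lemma pvS_cons_cons_eq {x : Char} (hx : x ∈ "abcdefghijklmnopqrstuvwxyz".toList)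
    (as_ bs : List Char) : pvS (x :: as_) (x :: bs) = pvS as_ bs + 1 := by
  unfold pvS
  rw [← List.sum_toFinset _ alpha_nodup, ← List.sum_toFinset _ alpha_nodup]
  have : ∀ c, min (((x :: as_).count c : Int)) (((x :: bs).count c : Int))
      = min ((as_.count c : Int)) ((bs.count c : Int)) + (if c = x then 1 else 0) := by
    intro c
    by_cases h : c = x
    · subst h
      simp only [List.count_cons_self]
      push_cast
      rw [min_add_add_right]
    · have h' : ¬ x = c := fun hh => h hh.symm
      simp [h, h']
  simp only [this]
  rw [Finset.sum_add_distrib, Finset.sum_ite_eq' _ x (fun _ => (1 : Int)),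
      if_pos (List.mem_toFinset.mpr hx)]

lemma pvS_cons_left_zero {x : Char} {b : List Char} (hx : b.count x = 0) (as_ : List Char) :
    pvS (x :: as_) b = pvS as_ b := by
  unfold pvS
  congr 1
  apply List.map_congr_left
  intro c _
  by_cases h : c = x
  · subst h
    rw [List.count_cons_self, hx]
    push_cast
    rw [min_eq_right (by positivity), min_eq_right (by positivity)]
  · have h' : ¬ x = c := fun hh => h hh.symm
    simp [h']

lemma pvS_cons_right_zero {y : Char} {a : List Char} (hy : a.count y = 0) (bs : List Char) :
    pvS a (y :: bs) = pvS a bs := by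
  unfold pvS
  congr 1
  apply List.map_congr_left
  intro c _
  by_cases h : c = y
  · subst h
    rw [List.count_cons_self, hy]
    push_cast
    rw [min_eq_left (by positivity), min_eq_left (by positivity)]
  · have h' : ¬ y = c := fun hh => h hh.symm
    simp [h']

-- the merge loop on two sorted letter lists computes the alphabet sum of min-counts
lemma mergeCount_eq : ∀ (a b : List Char) (t : Int),
    a.Pairwise (· ≤ ·) → b.Pairwise (· ≤ ·) →
    (∀ c ∈ a, c ∈ "abcdefghijklmnopqrstuvwxyz".toList) →
    pvMergeCount a b t = t + pvS a b := by
  intro a b t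
  induction a, b, t using pvMergeCount.induct with
  | case1 total as_ y bs ih =>
    intro ha hb hsa
    rw [show pvMergeCount (y :: as_) (y :: bs) total = pvMergeCount as_ bs (total + 1) by
          simp [pvMergeCount],
        ih (List.pairwise_cons.mp ha).2 (List.pairwise_cons.mp hb).2
          (fun c hc => hsa c (List.mem_cons_of_mem _ hc)),
        pvS_cons_cons_eq (hsa y List.mem_cons_self) as_ bs]
    ring
  | case2 total x as_ y bs hne hlt ih =>
    intro ha hb hsa
    have hcount : (y :: bs).count x = 0 := by
      rw [List.count_eq_zero]
      intro hmem
      rcases List.mem_cons.mp hmem with h | h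
      · exact hne h
      · exact absurd ((List.pairwise_cons.mp hb).1 x h) (not_le.mpr hlt)
    rw [show pvMergeCount (x :: as_) (y :: bs) total = pvMergeCount as_ (y :: bs) total by
          simp [pvMergeCount, hne, hlt],
        ih (List.pairwise_cons.mp ha).2 hb
          (fun c hc => hsa c (List.mem_cons_of_mem _ hc)),
        pvS_cons_left_zero hcount]
  | case3 total x as_ y bs hne hnlt ih =>
    intro ha hb hsa
    have hyx : y < x := lt_of_le_of_ne (le_of_not_gt hnlt) (fun h => hne h.symm)
    have hcount : (x :: as_).count y = 0 := by
      rw [List.count_eq_zero]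
      intro hmem
      rcases List.mem_cons.mp hmem with h | h
      · exact hne h.symm
      · exact absurd ((List.pairwise_cons.mp ha).1 y h) (not_le.mpr hyx)
    rw [show pvMergeCount (x :: as_) (y :: bs) total = pvMergeCount (x :: as_) bs total by
          simp [pvMergeCount, hne, hnlt],
        ih ha (List.pairwise_cons.mp hb).2 hsa,
        pvS_cons_right_zero hcount]
  | case4 a b total hnc =>
    intro _ _ _
    match a, b, hnc with
    | [], b, _ => rw [show pvMergeCount [] b total = total by simp [pvMergeCount], pvS_nil_left]; ring
    | x :: as_, [], _ =>
      rw [show pvMergeCount (x :: as_) [] total = total by simp [pvMergeCount], pvS_nil_right]; ring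
    | x :: as_, y :: bs, hnc => exact (hnc x as_ y bs rfl rfl).elim

-- A's whole computation, characterised as the same alphabet sum (over the filtered lists)
lemma A_eq (l1 l2 : List Char) :
    (((l1.foldl
        (fun d char => if pvIsLetter char then d.insert char (d.getD char 0 + 1) else d)
        (PySem.Dict.empty : PySem.Dict Char Int)).items).foldl
      (fun acc p =>
        if (l2.foldl
            (fun d char => if pvIsLetter char then d.insert char (d.getD char 0 + 1) else d)
            (PySem.Dict.empty : PySem.Dict Char Int)).contains p.1
        then acc + min p.2 ((l2.foldl
            (fun d char => if pvIsLetter char then d.insert char (d.getD char 0 + 1) else d)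
            (PySem.Dict.empty : PySem.Dict Char Int)).getD p.1 0)
        else acc) 0)
    = pvS (l1.filter pvIsLetter) (l2.filter pvIsLetter) := by
  rw [← List.foldl_filter (p := pvIsLetter), ← List.foldl_filter (p := pvIsLetter),
      PySem.Dict.foldl_insert_getD_add_one_eq_counter,
      PySem.Dict.foldl_insert_getD_add_one_eq_counter]
  set f1 := l1.filter pvIsLetter with hf1
  set f2 := l2.filter pvIsLetter with hf2
  rw [PySem.Dict.items_counter]
  have step : ∀ (acc : Int) (p : Char × Int),
      (if (PySem.Dict.counter f2).contains p.1 then acc + min p.2 ((PySem.Dict.counter f2).getD p.1 0) else acc)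
        = acc + (if p.1 ∈ f2 then min p.2 ((f2.count p.1 : Int)) else 0) := by
    intro acc p
    rw [PySem.Dict.contains_counter, PySem.Dict.getD_counter]
    by_cases h : p.1 ∈ f2 <;> simp [List.contains_eq_mem, h]
  calc ((PySem.Set.ofList f1).map (fun k => (k, (f1.count k : Int)))).foldl
        (fun acc p =>
          if (PySem.Dict.counter f2).contains p.1 then acc + min p.2 ((PySem.Dict.counter f2).getD p.1 0) else acc) 0
      = ((PySem.Set.ofList f1).map (fun k => (k, (f1.count k : Int)))).foldl
        (fun acc p => acc + (if p.1 ∈ f2 then min p.2 ((f2.count p.1 : Int)) else 0)) 0 := by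
        apply PySem.List.foldl_congr_mem
        intro acc p _
        exact step acc p
    _ = pvS f1 f2 := by
        rw [PySem.List.foldl_add, List.map_map, zero_add]
        have hmap : ((fun p : Char × Int => if p.1 ∈ f2 then min p.2 ((f2.count p.1 : Int)) else 0)
              ∘ fun k => (k, (f1.count k : Int)))
            = fun k => min ((f1.count k : Int)) ((f2.count k : Int)) := by
          funext k
          by_cases hk : k ∈ f2
          · simp [hk]
          · have h2 : ((f2.count k : Int)) = 0 := by simp [List.count_eq_zero.mpr hk]
            simp [hk, h2]
        rw [hmap]
        unfold pvS
        rw [← List.sum_toFinset _ (PySem.Set.nodup_ofList f1),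
            ← List.sum_toFinset _ alpha_nodup]
        apply Finset.sum_subset
        · intro c hc
          simp only [List.mem_toFinset] at hc ⊢
          exact mem_alpha (List.of_mem_filter ((PySem.Set.mem_ofList f1 c).mp hc))
        · intro c _ hc
          simp only [List.mem_toFinset] at hc
          have h0 : f1.count c = 0 := by
            rw [List.count_eq_zero]
            intro hmem
            exact hc ((PySem.Set.mem_ofList f1 c).mpr hmem)
          simp [h0]

-- ===== VERDICT (by name: the statement is the Claim_ definition above) =====
set_option maxHeartbeats 1000000 in
theorem calculate_name_match_spec : Claim_equal_calculate_name_match := by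
  intro name1 name2 _
  unfold Spec_calculate_name_match calculate_name_match calculate_name_match_alt
  set l1 := (PySem.Str.lower name1).toList
  set l2 := (PySem.Str.lower name2).toList
  set f1 := l1.filter pvIsLetter
  set f2 := l2.filter pvIsLetter
  have hsorted1 : (PySem.List.sorted f1 (fun c => c) false).Pairwise (· ≤ ·) :=
    PySem.List.sorted_pairwise f1 (fun c => c)
  have hsorted2 : (PySem.List.sorted f2 (fun c => c) false).Pairwise (· ≤ ·) :=
    PySem.List.sorted_pairwise f2 (fun c => c)
  have hmem1 : ∀ c ∈ PySem.List.sorted f1 (fun c => c) false,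
      c ∈ "abcdefghijklmnopqrstuvwxyz".toList := by
    intro c hc
    exact mem_alpha (List.of_mem_filter ((PySem.List.mem_sorted _ _ _ c).mp hc))
  rw [mergeCount_eq _ _ 0 hsorted1 hsorted2 hmem1, zero_add, A_eq]
  unfold pvS
  congr 1
  apply List.map_congr_left
  intro c _
  rw [(PySem.List.sorted_perm f1 (fun c => c) false).count_eq,
      (PySem.List.sorted_perm f2 (fun c => c) false).count_eq]
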